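-- pv_equiv track=rewrite | github.com/scottmccrimmon/autonomous-coding-agent | harness/filesystem.py | parse_files_from_response
-- ===== SOURCE A (Python) =====
-- from typing import Dict, List, Tuple
--
-- def parse_files_from_response(response: str) -> List[Tuple[str, str]]:
--     """
--     Extract FILE: sentinel blocks from an agent Act response.
--
--     Expected format in the response:
--         FILE: path/to/file.py
--         <file contents>
--         FILE: path/to/another.py
--         <file contents>
--
--     Returns a list of (relative_path, content) tuples in the order they
--     appear in the response.
--     """
--     files = []
--     current_path = None
--     current_lines = []
--
--     for line in response.splitlines():
--         if line.startswith("FILE:"):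
--             if current_path is not None:
--                 files.append((current_path, "\n".join(current_lines).rstrip()))
--             current_path = line.replace("FILE:", "").strip()
--             current_lines = []
--         else:
--             if current_path is not None:
--                 current_lines.append(line)
--
--     # Capture the final file block
--     if current_path is not None:
--         files.append((current_path, "\n".join(current_lines).rstrip()))
--
--     return files
-- ===== SOURCE B (Python) =====
-- def parse_files_from_response(response):
--     """Segment-based parser: walk an index over the lines; at each FILE: marker,
--     find the next marker and slice the content lines between them."""
--     lines = response.splitlines()
--     n = len(lines)
--     files = []
--     i = 0
--     while i < n:
--         if not lines[i].startswith("FILE:"):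
--             i += 1
--             continue
--         path = lines[i].replace("FILE:", "").strip()
--         j = i + 1
--         while j < n and not lines[j].startswith("FILE:"):
--             j += 1
--         files.append((path, "\n".join(lines[i + 1:j]).rstrip()))
--         i = j
--     return files
-- ===== Notes on version B (the rewrite author's own statement) =====
-- stated objective: alternative
-- what changed: Replaces A's single fold carrying a (current_path, current_lines) accumulator with a flush step by an index-driven segment scan: skip to each FILE: marker, scan ahead to the next marker, and slice the content lines between them.
import Mathlib
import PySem

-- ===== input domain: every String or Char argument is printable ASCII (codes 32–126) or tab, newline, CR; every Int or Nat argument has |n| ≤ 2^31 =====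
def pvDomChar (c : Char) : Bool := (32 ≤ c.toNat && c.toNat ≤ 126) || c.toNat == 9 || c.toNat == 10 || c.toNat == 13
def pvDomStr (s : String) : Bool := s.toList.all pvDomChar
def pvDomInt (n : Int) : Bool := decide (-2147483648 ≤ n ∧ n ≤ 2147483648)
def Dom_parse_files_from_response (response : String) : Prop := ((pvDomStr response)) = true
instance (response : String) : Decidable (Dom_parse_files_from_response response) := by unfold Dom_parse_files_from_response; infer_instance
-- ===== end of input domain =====

-- B replaces A's running (current_path, current_lines) accumulator with a marker-segment scan
-- (skip to each FILE: marker, slice the content lines up to the next marker): objective 'alternative'.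

-- ===== PORT A =====
-- A's loop body: state = (files, current_path, current_lines)
def pvStepA (st : List (String × String) × Option String × List String) (line : String) :
    List (String × String) × Option String × List String :=
  if PySem.Str.startswith line "FILE:" then
    ((match st.2.1 with
      | some p => st.1 ++ [(p, PySem.Str.rstrip (PySem.Str.join "\n" st.2.2))]
      | none => st.1),
     some (PySem.Str.strip (PySem.Str.replace line "FILE:" "")), [])
  else
    (st.1, st.2.1,
     match st.2.1 with
     | some _ => st.2.2 ++ [line]
     | none => st.2.2)

-- A's final 'capture the last block' step (same code as the flush inside the loop)
def pvFlushA (st : List (String × String) × Option String × List String) : List (String × String) :=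
  match st.2.1 with
  | some p => st.1 ++ [(p, PySem.Str.rstrip (PySem.Str.join "\n" st.2.2))]
  | none => st.1

def parse_files_from_response (response : String) : List (String × String) :=
  pvFlushA ((PySem.Str.splitlines response).foldl pvStepA ([], none, []))

-- ===== PORT B =====
-- Source B's inner 'while j < n and not lines[j].startswith("FILE:")' scan = takeWhile/dropWhile on
-- the remaining lines; the outer index loop = structural recursion on the remaining lines.
def pvNotMarker (l : String) : Bool := !PySem.Str.startswith l "FILE:"

def pvBlocks : List String → List (String × String)
  | [] => []
  | l :: rest =>
    if PySem.Str.startswith l "FILE:" then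
      (PySem.Str.strip (PySem.Str.replace l "FILE:" ""),
       PySem.Str.rstrip (PySem.Str.join "\n" (rest.takeWhile pvNotMarker)))
        :: pvBlocks (rest.dropWhile pvNotMarker)
    else pvBlocks rest
termination_by lines => lines.length
decreasing_by
  · exact Nat.lt_succ_of_le (List.length_dropWhile_le _ _)
  · simp

def parse_files_from_response_alt (response : String) : List (String × String) :=
  pvBlocks (PySem.Str.splitlines response)

-- ===== PRECONDITION & SPEC =====
def Spec_parse_files_from_response (response : String) (out : List (String × String)) : Prop := out = parse_files_from_response_alt response
instance (response : String) (out : List (String × String)) : Decidable (Spec_parse_files_from_response response out) := by unfold Spec_parse_files_from_response; infer_instance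

-- ===== CLAIM (what is proved, stated in full; the proofs are below) =====
def Claim_equal_parse_files_from_response : Prop := ∀ (response : String), Dom_parse_files_from_response response → Spec_parse_files_from_response response (parse_files_from_response response)

-- ===== LEMMAS AND PROOFS =====

theorem pvNotMarker_false (l : String) (h : PySem.Str.startswith l "FILE:" = true) :
    pvNotMarker l = false := by unfold pvNotMarker; rw [h]; rfl

theorem pvNotMarker_true (l : String) (h : PySem.Str.startswith l "FILE:" = false) :
    pvNotMarker l = true := by unfold pvNotMarker; rw [h]; rfl

theorem pvBlocks_cons_marker (l : String) (ls : List String)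
    (h : PySem.Str.startswith l "FILE:" = true) :
    pvBlocks (l :: ls) = (PySem.Str.strip (PySem.Str.replace l "FILE:" ""),
      PySem.Str.rstrip (PySem.Str.join "\n" (ls.takeWhile pvNotMarker)))
        :: pvBlocks (ls.dropWhile pvNotMarker) := by
  rw [pvBlocks, if_pos h]

theorem pvBlocks_cons_skip (l : String) (ls : List String)
    (h : PySem.Str.startswith l "FILE:" = false) :
    pvBlocks (l :: ls) = pvBlocks ls := by
  rw [pvBlocks, if_neg]; simpa using h

theorem pvStepA_marker (st : List (String × String) × Option String × List String)
    (line : String) (h : PySem.Str.startswith line "FILE:" = true) :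
    pvStepA st line =
      (pvFlushA st, some (PySem.Str.strip (PySem.Str.replace line "FILE:" "")), []) := by
  unfold pvStepA pvFlushA; rw [if_pos h]

theorem pvStepA_other (st : List (String × String) × Option String × List String)
    (line : String) (h : PySem.Str.startswith line "FILE:" = false) :
    pvStepA st line =
      (st.1, st.2.1, match st.2.1 with | some _ => st.2.2 ++ [line] | none => st.2.2) := by
  unfold pvStepA; rw [if_neg (ne_true_of_eq_false h)]

-- Invariant while a block is open: flushing the fold equals emitting the open block
-- (its pending lines plus the content up to the next marker) and parsing the rest with B.
theorem pv_some_inv (lines : List String) :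
    ∀ (files : List (String × String)) (p : String) (acc : List String),
      pvFlushA (lines.foldl pvStepA (files, some p, acc)) =
        files ++ (p, PySem.Str.rstrip (PySem.Str.join "\n" (acc ++ lines.takeWhile pvNotMarker)))
          :: pvBlocks (lines.dropWhile pvNotMarker) := by
  induction lines with
  | nil => intro files p acc; simp [pvFlushA, pvBlocks]
  | cons l ls ih =>
    intro files p acc
    cases hb : PySem.Str.startswith l "FILE:" with
    | false =>
      rw [List.foldl_cons, pvStepA_other _ _ hb]
      rw [show (match (files, some p, acc).2.1 with
            | some _ => (files, some p, acc).2.2 ++ [l]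
            | none => (files, some p, acc).2.2) = acc ++ [l] from rfl]
      rw [ih, List.takeWhile_cons, List.dropWhile_cons, pvNotMarker_true l hb]
      simp
    | true =>
      rw [List.foldl_cons, pvStepA_marker _ _ hb, ih,
        List.takeWhile_cons, List.dropWhile_cons, pvNotMarker_false l hb]
      simp [pvFlushA, pvBlocks_cons_marker l ls hb]

-- Before the first marker: the fold with no open block equals B's parse of the remaining lines.
theorem pv_none_inv (lines : List String) :
    ∀ (files : List (String × String)),
      pvFlushA (lines.foldl pvStepA (files, none, [])) = files ++ pvBlocks lines := by
  induction lines with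
  | nil => intro files; simp [pvFlushA, pvBlocks]
  | cons l ls ih =>
    intro files
    cases hb : PySem.Str.startswith l "FILE:" with
    | false =>
      rw [List.foldl_cons, pvStepA_other _ _ hb, ih, pvBlocks_cons_skip l ls hb]
    | true =>
      rw [List.foldl_cons, pvStepA_marker _ _ hb, pv_some_inv, pvBlocks_cons_marker l ls hb]
      simp [pvFlushA]

-- ===== VERDICT (by name: the statement is the Claim_ definition above) =====
theorem parse_files_from_response_spec : Claim_equal_parse_files_from_response := by
  intro response _
  unfold Spec_parse_files_from_response parse_files_from_response parse_files_from_response_alt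
  simpa using pv_none_inv (PySem.Str.splitlines response) []
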